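-- pv_equiv track=rewrite | github.com/kropacek/A-DS-ITMO | Task1.py | knut_moris
-- ===== SOURCE A (Python) =====
-- def knut_moris(nums: str) -> dict:
--     def search(string: str, pattern: str) -> list[int]:
--         def prefix(string: str) -> int:
--             pi = [0] * len(string)
--             i, j = 1, 0
--             while i < len(string):
--                 if string[i] == string[j]:
--                     pi[i] = j + 1
--                     i += 1;
--                     j += 1
--                 elif j == 0:
--                     pi[i] = 0
--                     i += 1
--                 else:
--                     j = pi[j - 1]
--             return pi
--
--         prefix_string = prefix(pattern)
--         i, j = 0, 0
--         k = 0
--         while i < len(string):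
--             if string[i] == pattern[j]:
--                 i += 1
--                 j += 1
--                 if j == len(pattern):
--                     k += 1
--                     if prefix_string == [0, 1]:
--                         j = 1
--                     else:
--                         j = 0
--
--             else:
--                 if j > 0:
--                     j = prefix_string[j - 1]
--                 else:
--                     i += 1
--         return k
--
--     res = {str(i): search(nums, str(i)) for i in range(10, 100)}
--     return res
-- ===== SOURCE B (Python) =====
-- def knut_moris(nums: str) -> dict:
--     res = {str(i): 0 for i in range(10, 100)}
--     for i in range(len(nums) - 1):
--         p = nums[i:i + 2]
--         if p in res:
--             res[p] += 1
--     return res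
-- ===== Notes on version B (the rewrite author's own statement) =====
-- stated objective: faster
-- what changed: B drops the KMP prefix-function machinery and the 90 per-pattern scans of the string, and instead initialises a dict of 90 zero counters and makes one pass over the string's adjacent character pairs, incrementing the counter of each pair found.
import Mathlib
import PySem

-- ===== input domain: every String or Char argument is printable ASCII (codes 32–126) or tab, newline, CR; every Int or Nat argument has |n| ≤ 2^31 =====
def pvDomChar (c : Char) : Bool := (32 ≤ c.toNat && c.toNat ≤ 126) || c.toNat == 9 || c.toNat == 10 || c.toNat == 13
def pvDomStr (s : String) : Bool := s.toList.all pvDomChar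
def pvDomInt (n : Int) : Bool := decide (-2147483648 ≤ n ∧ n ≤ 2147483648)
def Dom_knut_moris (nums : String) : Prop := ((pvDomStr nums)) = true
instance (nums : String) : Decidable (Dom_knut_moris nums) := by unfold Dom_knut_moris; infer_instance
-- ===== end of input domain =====

-- B replaces A's per-pattern KMP scans (one scan of the string for each of the 90 patterns)
-- by a dict of 90 zero counters and a single pass over the adjacent character pairs of the string.

-- ===== PORT A =====
-- inner 'prefix' while-loop of A; the fuel argument only makes the loop total,
-- each iteration is exactly Python's
def pvPrefixLoop (s : List Char) (pi : List Nat) (i j : Nat) : Nat → List Nat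
  | 0 => pi
  | fuel + 1 =>
    if i < s.length then
      if s[i]? = s[j]? then
        pvPrefixLoop s (pi.set i (j + 1)) (i + 1) (j + 1) fuel
      else if j = 0 then
        pvPrefixLoop s (pi.set i 0) (i + 1) j fuel
      else
        pvPrefixLoop s pi i (pi.getD (j - 1) 0) fuel
    else pi

def pvPrefix (p : List Char) : List Nat :=
  pvPrefixLoop p (List.replicate p.length 0) 1 0 (2 * p.length + 1)

-- search's main while-loop of A; fuel again only makes the loop total
def pvSearchLoop (s p : List Char) (pre : List Nat) (i j : Nat) (k : Int) : Nat → Int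
  | 0 => k
  | fuel + 1 =>
    if i < s.length then
      if s[i]? = p[j]? then
        if j + 1 = p.length then
          pvSearchLoop s p pre (i + 1) (if pre = [0, 1] then 1 else 0) (k + 1) fuel
        else
          pvSearchLoop s p pre (i + 1) (j + 1) k fuel
      else if j > 0 then
        pvSearchLoop s p pre i (pre.getD (j - 1) 0) k fuel
      else
        pvSearchLoop s p pre (i + 1) j k fuel
    else k

def pvSearch (s p : List Char) : Int :=
  pvSearchLoop s p (pvPrefix p) 0 0 0 (2 * s.length + 1)

def knut_moris (nums : String) : List (String × Int) :=
  ((PySem.List.pyRange 10 100).foldl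
    (fun d i => d.insert (PySem.Int.toStr i) (pvSearch nums.toList (PySem.Int.toStr i).toList))
    (PySem.Dict.empty : PySem.Dict String Int)).items

-- ===== PORT B =====
-- one step of B's single pass: p = nums[i:i+2]; if p in res: res[p] += 1
def pvStep (nums : String) (d : PySem.Dict String Int) (i : Int) : PySem.Dict String Int :=
  let p := PySem.Str.slice nums (some i) (some (i + 2))
  if d.contains p then d.modify p 0 (· + 1) else d

def knut_moris_alt (nums : String) : List (String × Int) :=
  let res0 : PySem.Dict String Int :=
    (PySem.List.pyRange 10 100).foldl (fun d i => d.insert (PySem.Int.toStr i) 0) PySem.Dict.empty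
  ((PySem.List.pyRange 0 (PySem.Str.len nums - 1)).foldl (pvStep nums) res0).items

-- ===== PRECONDITION & SPEC =====
def Spec_knut_moris (nums : String) (out : List (String × Int)) : Prop := out = knut_moris_alt nums
instance (nums : String) (out : List (String × Int)) : Decidable (Spec_knut_moris nums out) := by unfold Spec_knut_moris; infer_instance

-- ===== CLAIM (what is proved, stated in full; the proofs are below) =====
def Claim_equal_knut_moris : Prop := ∀ (nums : String), Dom_knut_moris nums → Spec_knut_moris nums (knut_moris nums)

-- ===== LEMMAS AND PROOFS =====

-- number of adjacent positions of s carrying the pair (c, d)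
def pvPairCount (c d : Char) : List Char → Int
  | x :: y :: t => (if x = c ∧ y = d then 1 else 0) + pvPairCount c d (y :: t)
  | _ => 0

lemma pvPrefix_pair (c d : Char) : pvPrefix [c, d] = if d = c then [0, 1] else [0, 0] := by
  by_cases h : d = c <;> simp [pvPrefix, pvPrefixLoop, List.replicate, h]

lemma pvPairCount_cons (c d x : Char) (t : List Char) :
    pvPairCount c d (x :: t) =
      (if x = c ∧ t.head? = some d then 1 else 0) + pvPairCount c d t := by
  cases t <;> simp [pvPairCount]

lemma pvSearchLoop_eq (c d : Char) (s : List Char) :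
    ∀ fuel i k,
      (2 * (s.length - i) < fuel →
        pvSearchLoop s [c, d] (pvPrefix [c, d]) i 0 k fuel = k + pvPairCount c d (s.drop i)) ∧
      (2 * (s.length - i) + 1 < fuel →
        pvSearchLoop s [c, d] (pvPrefix [c, d]) i 1 k fuel
          = k + (if s[i]? = some d then 1 else 0) + pvPairCount c d (s.drop i)) := by
  intro fuel
  induction fuel with
  | zero => intro i k; exact ⟨fun h => absurd h (by omega), fun h => absurd h (by omega)⟩
  | succ fuel ih =>
    intro i k
    constructor
    · intro h
      rw [pvSearchLoop]
      by_cases hi : i < s.length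
      · rw [if_pos hi, List.getElem?_eq_getElem hi]
        have hdrop : s.drop i = s[i] :: s.drop (i + 1) := (List.getElem_cons_drop hi).symm
        by_cases hx : s[i] = c
        · rw [if_pos (by simp [hx]), if_neg (by simp)]
          show pvSearchLoop s [c, d] (pvPrefix [c, d]) (i + 1) 1 k fuel = _
          rw [(ih (i + 1) k).2 (by omega), hdrop, pvPairCount_cons, List.head?_drop]
          simp only [hx, true_and]
          ring
        · rw [if_neg (by simp [hx]), if_neg (by simp)]
          rw [(ih (i + 1) k).1 (by omega), hdrop, pvPairCount_cons]
          simp [hx]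
      · rw [if_neg hi, List.drop_eq_nil_of_le (by omega)]
        simp [pvPairCount]
    · intro h
      rw [pvSearchLoop]
      by_cases hi : i < s.length
      · rw [if_pos hi, List.getElem?_eq_getElem hi]
        have hdrop : s.drop i = s[i] :: s.drop (i + 1) := (List.getElem_cons_drop hi).symm
        by_cases hx : s[i] = d
        · rw [if_pos (by simp [hx]), if_pos (by simp)]
          by_cases hcd : d = c
          · rw [if_pos (by rw [pvPrefix_pair, if_pos hcd])]
            rw [(ih (i + 1) (k + 1)).2 (by omega), hdrop, pvPairCount_cons, List.head?_drop]
            have htwo : (s[i] = c ∧ s[i + 1]? = some d) ↔ (s[i + 1]? = some d) :=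
              ⟨fun h2 => h2.2, fun h2 => ⟨by rw [hx, hcd], h2⟩⟩
            rw [if_pos (congrArg some hx), if_congr htwo rfl rfl]
            ring
          · rw [if_neg (by rw [pvPrefix_pair, if_neg hcd]; simp)]
            rw [(ih (i + 1) (k + 1)).1 (by omega), hdrop, pvPairCount_cons]
            have hcond : ¬(s[i] = c ∧ (s.drop (i + 1)).head? = some d) := by
              rintro ⟨h1, -⟩; exact hcd (h1 ▸ hx.symm)
            rw [if_pos (congrArg some hx), if_neg hcond]
            ring
        · rw [if_neg (by simp [hx]), if_pos (by simp)]
          show pvSearchLoop s [c, d] (pvPrefix [c, d]) i ((pvPrefix [c, d]).getD 0 0) k fuel = _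
          have hget : (pvPrefix [c, d]).getD 0 0 = 0 := by
            rw [pvPrefix_pair]; by_cases hcd : d = c <;> simp [hcd]
          rw [hget, (ih i k).1 (by omega), if_neg (by simp [hx])]
          ring
      · rw [if_neg hi, List.drop_eq_nil_of_le (by omega)]
        have : s[i]? = none := by rw [List.getElem?_eq_none]; omega
        simp [this, pvPairCount]

lemma pvSearch_eq_pairCount (c d : Char) (s : List Char) :
    pvSearch s [c, d] = pvPairCount c d s := by
  have := (pvSearchLoop_eq c d s (2 * s.length + 1) 0 0).1 (by omega)
  simpa [pvSearch] using this

lemma pvPairCount_eq_count (c d : Char) :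
    ∀ s : List Char,
      pvPairCount c d s =
        ((List.range (s.length - 1)).countP
          (fun k => decide ((s.drop k).take 2 = [c, d])) : Nat) := by
  intro s
  induction s with
  | nil => simp [pvPairCount]
  | cons x t ih =>
    cases t with
    | nil => simp [pvPairCount]
    | cons y t' =>
      rw [pvPairCount]
      have hlen : (x :: y :: t').length - 1 = ((y :: t').length - 1) + 1 := by
        simp
      rw [hlen, List.range_succ_eq_map, List.countP_cons, List.countP_map]
      have hfun : ((fun k => decide ((List.drop k (x :: y :: t')).take 2 = [c, d])) ∘ Nat.succ)
          = (fun k => decide ((List.drop k (y :: t')).take 2 = [c, d])) := by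
        funext k; simp [Function.comp, List.drop_succ_cons]
      rw [hfun]
      push_cast
      rw [← ih]
      have hpred : (decide ((List.drop 0 (x :: y :: t')).take 2 = [c, d]) = true)
          ↔ (x = c ∧ y = d) := by
        simp [List.take]
      by_cases hxy : x = c ∧ y = d
      · rw [if_pos hxy, if_pos (hpred.mpr hxy)]; ring
      · rw [if_neg hxy, if_neg (fun hh => hxy (hpred.mp hh))]; ring

lemma pvStep_keys (nums : String) (d : PySem.Dict String Int) (i : Int) :
    (pvStep nums d i).keys = d.keys := by
  unfold pvStep
  by_cases hc : d.contains (PySem.Str.slice nums (some i) (some (i + 2)))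
  · simp only [hc, if_true, PySem.Dict.keys_modify, PySem.Dict.keys_insert_of_contains _ _ hc]
  · simp [hc]

lemma pvKeys_fold (nums : String) :
    ∀ (L : List Int) (d : PySem.Dict String Int),
      (L.foldl (pvStep nums) d).keys = d.keys := by
  intro L
  induction L with
  | nil => intro d; rfl
  | cons i L ih => intro d; rw [List.foldl_cons, ih, pvStep_keys]

lemma pvGetD_fold (nums : String) :
    ∀ (L : List Int) (d : PySem.Dict String Int), d.keys.Nodup → ∀ (q : String),
      (L.foldl (pvStep nums) d).getD q 0 =
        d.getD q 0 +
          (if d.contains q then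
            ((L.countP (fun i => PySem.Str.slice nums (some i) (some (i + 2)) == q)) : Int)
          else 0) := by
  intro L
  induction L with
  | nil => intro d hnd q; simp
  | cons i L ih =>
    intro d hnd q
    rw [List.foldl_cons]
    have hnd' : (pvStep nums d i).keys.Nodup := (pvStep_keys nums d i).symm ▸ hnd
    rw [ih (pvStep nums d i) hnd' q, List.countP_cons]
    by_cases hc : d.contains (PySem.Str.slice nums (some i) (some (i + 2)))
    · have hstep : pvStep nums d i
          = d.modify (PySem.Str.slice nums (some i) (some (i + 2))) 0 (· + 1) := by
        simp [pvStep, hc]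
      rw [hstep, PySem.Dict.getD_modify, PySem.Dict.contains_modify]
      by_cases hq : q = PySem.Str.slice nums (some i) (some (i + 2))
      · rw [← hq] at hc ⊢
        simp only [beq_self_eq_true, Bool.true_or, hc, if_true]
        push_cast
        ring
      · have hbeq : (PySem.Str.slice nums (some i) (some (i + 2)) == q) = false := by
          simp only [beq_eq_false_iff_ne, ne_eq]
          exact fun hh => hq hh.symm
        have hbeq2 : (q == PySem.Str.slice nums (some i) (some (i + 2))) = false := by
          simp only [beq_eq_false_iff_ne, ne_eq]
          exact hq
        rw [if_neg hq, hbeq, hbeq2]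
        simp only [Bool.false_or]
        by_cases hcq : d.contains q
        · rw [if_pos hcq, if_pos hcq]
          push_cast
          ring
        · rw [if_neg hcq, if_neg hcq]
    · have hstep : pvStep nums d i = d := by simp [pvStep, hc]
      rw [hstep]
      by_cases hcq : d.contains q
      · have hbeq : (PySem.Str.slice nums (some i) (some (i + 2)) == q) = false := by
          simp only [beq_eq_false_iff_ne, ne_eq]
          intro hh
          rw [hh] at hc
          exact hc hcq
        rw [hbeq, if_pos hcq, if_pos hcq]
        push_cast
        ring
      · rw [if_neg hcq, if_neg hcq]

lemma pvCount_bridge (nums q : String) (c d : Char) (hq : q.toList = [c, d]) :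
    ((PySem.List.pyRange 0 (PySem.Str.len nums - 1)).countP
        (fun i => PySem.Str.slice nums (some i) (some (i + 2)) == q))
      = (List.range (nums.toList.length - 1)).countP
          (fun k => decide ((nums.toList.drop k).take 2 = [c, d])) := by
  rw [PySem.List.pyRange_one, List.countP_map]
  have hto : ((PySem.Str.len nums) - 1 - 0).toNat = nums.toList.length - 1 := by
    rw [PySem.Str.len_eq]; omega
  rw [hto]
  apply List.countP_congr
  intro k hk
  simp only [Function.comp, zero_add]
  have hslice : (PySem.Str.slice nums (some (k : Int)) (some ((k : Int) + 2))).toList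
      = (nums.toList.drop k).take 2 := by
    rw [PySem.Str.toList_slice]
    have h2 : ((k : Int) + 2) = ((k : Int) + ((2 : Nat) : Int)) := by norm_num
    rw [h2]
    exact PySem.List.slice_natCast_add nums.toList k 2
  rw [show (PySem.Str.slice nums (some (k : Int)) (some ((k : Int) + 2)) == q)
      = decide ((nums.toList.drop k).take 2 = [c, d]) from ?_]
  rw [Bool.eq_iff_iff]
  simp only [beq_iff_eq, decide_eq_true_eq]
  rw [← String.toList_inj, hslice, hq]

lemma pvToStr_nodup : ((PySem.List.pyRange 10 100).map PySem.Int.toStr).Nodup := by decide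

lemma pvToStr_len2 : ∀ i ∈ PySem.List.pyRange 10 100, (PySem.Int.toStr i).toList.length = 2 := by
  decide

theorem knut_moris_eq (nums : String) : knut_moris nums = knut_moris_alt nums := by
  unfold knut_moris knut_moris_alt
  have hfresh : ∀ i ∈ PySem.List.pyRange 10 100,
      (PySem.Dict.empty : PySem.Dict String Int).contains (PySem.Int.toStr i) = false := by
    intro i _
    simp [PySem.Dict.contains_empty]
  have hA := PySem.Dict.items_foldl_insert_fresh (PySem.List.pyRange 10 100) PySem.Int.toStr
      (fun i => pvSearch nums.toList (PySem.Int.toStr i).toList) PySem.Dict.empty hfresh pvToStr_nodup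
  have hB0 := PySem.Dict.items_foldl_insert_fresh (PySem.List.pyRange 10 100) PySem.Int.toStr
      (fun _ => (0 : Int)) PySem.Dict.empty hfresh pvToStr_nodup
  set R := PySem.List.pyRange 10 100 with hR
  set res0 : PySem.Dict String Int :=
    R.foldl (fun d i => d.insert (PySem.Int.toStr i) 0) PySem.Dict.empty with hres0
  set L := PySem.List.pyRange 0 (PySem.Str.len nums - 1) with hL
  have hitems0 : res0.items = R.map (fun i => (PySem.Int.toStr i, (0 : Int))) := by
    simpa using hB0
  have hkeys0 : res0.keys = R.map PySem.Int.toStr := by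
    simp only [PySem.Dict.keys, hitems0, List.map_map]
    rfl
  have hknodup : res0.keys.Nodup := by rw [hkeys0]; exact pvToStr_nodup
  have hkeysF : (L.foldl (pvStep nums) res0).keys = res0.keys := pvKeys_fold nums L res0
  have hFnodup : (L.foldl (pvStep nums) res0).keys.Nodup := by rw [hkeysF]; exact hknodup
  rw [PySem.Dict.items_eq_map_keys _ hFnodup 0, hkeysF, hkeys0, List.map_map]
  rw [show ((R.foldl (fun d i =>
        d.insert (PySem.Int.toStr i) (pvSearch nums.toList (PySem.Int.toStr i).toList))
        (PySem.Dict.empty : PySem.Dict String Int)).items)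
      = R.map (fun i => (PySem.Int.toStr i, pvSearch nums.toList (PySem.Int.toStr i).toList))
    from by simpa using hA]
  apply List.map_congr_left
  intro i hi
  simp only [Function.comp]
  refine Prod.ext rfl ?_
  have h2 : (PySem.Int.toStr i).toList.length = 2 := pvToStr_len2 i hi
  obtain ⟨c, d, hcd⟩ := List.length_eq_two.mp h2
  have hcont : res0.contains (PySem.Int.toStr i) = true := by
    rw [PySem.Dict.contains_iff_mem_keys, hkeys0]
    exact List.mem_map_of_mem hi
  have hval0 : res0.getD (PySem.Int.toStr i) 0 = 0 :=
    PySem.Dict.getD_of_mem_items res0 (by rw [hitems0]; exact List.mem_map_of_mem hi) hknodup 0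
  rw [pvGetD_fold nums L res0 hknodup, hval0, if_pos hcont,
    pvCount_bridge nums (PySem.Int.toStr i) c d hcd, hcd,
    pvSearch_eq_pairCount, pvPairCount_eq_count]
  ring

-- ===== VERDICT (by name: the statement is the Claim_ definition above) =====
theorem knut_moris_spec : Claim_equal_knut_moris := by
  intro nums _
  show knut_moris nums = knut_moris_alt nums
  exact knut_moris_eq nums
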